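-- pv_equiv track=rewrite | github.com/jiacheng-xu/DiscoBERT | model/data_reader.py | map_disco_to_sent
-- ===== SOURCE A (Python) =====
-- from typing import Dict, Optional, List, Any
--
-- def map_disco_to_sent(disco_span: List[tuple]):
--     map_to_sent = [0 for _ in range(len(disco_span))]
--     curret_sent = 0
--     current_idx = 1
--     for idx, disco in enumerate(disco_span):
--         if disco[0] == current_idx:
--             map_to_sent[idx] = curret_sent
--         else:
--             curret_sent += 1
--             map_to_sent[idx] = curret_sent
--         current_idx = disco[1]
--     return map_to_sent
-- ===== SOURCE B (Python) =====
-- def map_disco_to_sent(disco_span):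
--     # collect the positions where a new sentence begins (span start differs
--     # from the previous span's end, seeded with 1)
--     breaks = []
--     prev = 1
--     for i, (s, e) in enumerate(disco_span):
--         if s != prev:
--             breaks.append(i)
--         prev = e
--     # sentence index of position i = number of break positions <= i,
--     # obtained by binary search in the sorted break-position list
--     def rank(i):
--         lo, hi = 0, len(breaks)
--         while lo < hi:
--             mid = (lo + hi) // 2
--             if breaks[mid] <= i:
--                 lo = mid + 1
--             else:
--                 hi = mid
--         return lo
--     return [rank(i) for i in range(len(disco_span))]
-- ===== Notes on version B (the rewrite author's own statement) =====
-- stated objective: alternative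
-- what changed: Instead of A's single stateful scan that emits a running sentence counter per span, B first collects the sorted list of break positions and then computes each span's sentence index as the number of break positions <= i, found by hand-written binary search over that list.
import Mathlib
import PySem

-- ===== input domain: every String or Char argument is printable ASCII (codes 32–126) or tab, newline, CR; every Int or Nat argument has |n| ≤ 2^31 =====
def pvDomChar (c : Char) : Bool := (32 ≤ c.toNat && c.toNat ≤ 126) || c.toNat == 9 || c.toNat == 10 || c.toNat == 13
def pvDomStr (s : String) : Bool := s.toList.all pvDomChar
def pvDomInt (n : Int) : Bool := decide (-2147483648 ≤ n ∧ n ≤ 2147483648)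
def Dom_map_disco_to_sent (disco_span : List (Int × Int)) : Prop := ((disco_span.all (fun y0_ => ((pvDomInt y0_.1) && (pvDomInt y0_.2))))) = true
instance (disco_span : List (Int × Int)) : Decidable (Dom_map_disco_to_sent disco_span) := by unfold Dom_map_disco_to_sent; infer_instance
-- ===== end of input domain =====

-- B replaces A's running-counter scan by collecting break positions and binary-searching their rank per index; objective: alternative.

-- ===== PORT A =====
def map_disco_to_sent (disco_span : List (Int × Int)) : List Int :=
  let map_to_sent : List Int := (List.range disco_span.length).map (fun _ => (0 : Int))
  let r := (PySem.List.enumerate disco_span).foldl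
    (fun (st : List Int × Int × Int) p =>
      let m := st.1; let curret_sent := st.2.1; let current_idx := st.2.2
      if p.2.1 == current_idx then
        (m.set p.1.toNat curret_sent, curret_sent, p.2.2)
      else
        (m.set p.1.toNat (curret_sent + 1), curret_sent + 1, p.2.2))
    (map_to_sent, 0, 1)
  r.1

-- ===== PORT B =====
-- breaks-collecting loop of Source B: state (breaks, prev), seeded ([], 1)
def pvBreaks (disco_span : List (Int × Int)) : List Int :=
  ((PySem.List.enumerate disco_span).foldl
    (fun (st : List Int × Int) p =>
      ((if p.2.1 != st.2 then st.1 ++ [p.1] else st.1), p.2.2))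
    ([], 1)).1

-- Source B's `rank` while-loop; `breaks.getD mid 0` is exact here since the loop
-- keeps mid < hi ≤ len(breaks), so Python's breaks[mid] never raises
def pvRankLoop (breaks : List Int) (i : Int) (lo hi : Nat) : Nat :=
  if h : lo < hi then
    let mid := (lo + hi) / 2
    if breaks.getD mid 0 ≤ i then pvRankLoop breaks i (mid + 1) hi
    else pvRankLoop breaks i lo mid
  else lo
termination_by hi - lo
decreasing_by
  · have h1 : (lo + hi) / 2 < hi := Nat.div_lt_of_lt_mul (by omega)
    have h2 : lo ≤ (lo + hi) / 2 := Nat.le_div_iff_mul_le (by omega) |>.mpr (by omega)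
    omega
  · have h1 : (lo + hi) / 2 < hi := Nat.div_lt_of_lt_mul (by omega)
    have h2 : lo ≤ (lo + hi) / 2 := Nat.le_div_iff_mul_le (by omega) |>.mpr (by omega)
    omega

def map_disco_to_sent_alt (disco_span : List (Int × Int)) : List Int :=
  let breaks := pvBreaks disco_span
  (PySem.List.pyRange 0 disco_span.length 1).map
    (fun i => (pvRankLoop breaks i 0 breaks.length : Int))

-- ===== PRECONDITION & SPEC =====
def Spec_map_disco_to_sent (disco_span : List (Int × Int)) (out : List Int) : Prop := out = map_disco_to_sent_alt disco_span
instance (disco_span : List (Int × Int)) (out : List Int) : Decidable (Spec_map_disco_to_sent disco_span out) := by unfold Spec_map_disco_to_sent; infer_instance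

-- ===== CLAIM (what is proved, stated in full; the proofs are below) =====
def Claim_equal_map_disco_to_sent : Prop := ∀ (disco_span : List (Int × Int)), Dom_map_disco_to_sent disco_span → Spec_map_disco_to_sent disco_span (map_disco_to_sent disco_span)

-- ===== LEMMAS AND PROOFS =====

/-- Recursive characterisation of A's loop: previous-end `ci`, counter `cs`. -/
def pvRun (ci cs : Int) : List (Int × Int) → List Int
  | [] => []
  | (s, e) :: t =>
    let cs' := if s = ci then cs else cs + 1
    cs' :: pvRun e cs' t

/-- Boolean break pattern of the span list, relative to previous end `ci`. -/
def pvBrk (ci : Int) : List (Int × Int) → List Bool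
  | [] => []
  | (s, e) :: t => (decide (s ≠ ci)) :: pvBrk e t

/-- Positions (starting at `k`) of the `true`s of a boolean list. -/
def pvTrueIdx (k : Int) : List Bool → List Int
  | [] => []
  | b :: t => if b then k :: pvTrueIdx (k + 1) t else pvTrueIdx (k + 1) t

theorem pvA_run (l : List (Int × Int)) : ∀ (k : Nat) (m : List Int) (cs ci : Int),
    m.length = k + l.length →
    ((PySem.List.enumerate l (k : Int)).foldl
      (fun (st : List Int × Int × Int) p =>
        if p.2.1 == st.2.2 then
          (st.1.set p.1.toNat st.2.1, st.2.1, p.2.2)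
        else
          (st.1.set p.1.toNat (st.2.1 + 1), st.2.1 + 1, p.2.2))
      (m, cs, ci)).1
    = m.take k ++ pvRun ci cs l := by
  induction l with
  | nil =>
    intro k m cs ci hlen
    simp only [PySem.List.enumerate_nil, List.foldl_nil, pvRun, List.append_nil]
    exact (List.take_of_length_le (by simp at hlen; omega)).symm
  | cons x t ih =>
    intro k m cs ci hlen
    have hk : k < m.length := by simp at hlen; omega
    have hset : ∀ (v : Int), (m.set k v).take (k + 1) = m.take k ++ [v] := by
      intro v
      have hlt : (m.take k).length = k := by simp; omega
      rw [List.set_eq_take_cons_drop v (l := m) (by omega), List.take_append,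
        List.take_of_length_le (by omega), hlt]
      simp
    rw [PySem.List.enumerate_cons]
    simp only [List.foldl_cons, pvRun]
    by_cases h : x.1 = ci
    · have hrec := ih (k + 1) (m.set k cs) cs x.2 (by simp at hlen ⊢; omega)
      push_cast at hrec
      rw [hset] at hrec
      simp only [beq_iff_eq] at hrec
      simp [h, Int.toNat_natCast, hrec]
    · have hrec := ih (k + 1) (m.set k (cs + 1)) (cs + 1) x.2 (by simp at hlen ⊢; omega)
      push_cast at hrec
      rw [hset] at hrec
      simp only [beq_iff_eq] at hrec
      simp [h, Int.toNat_natCast, hrec]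

/-- A's run is the running count of breaks. -/
theorem pvRun_eq_count (l : List (Int × Int)) : ∀ (ci cs : Int),
    pvRun ci cs l = (List.range l.length).map
      (fun n => cs + (((pvBrk ci l).take (n + 1)).countP id : Int)) := by
  induction l with
  | nil => intro ci cs; rfl
  | cons x t ih =>
    intro ci cs
    simp only [pvRun, pvBrk, List.length_cons, List.range_succ_eq_map, List.map_cons, List.map_map]
    congr 1
    · simp only [List.take, List.countP_cons, List.countP_nil, id]
      by_cases h : x.1 = ci <;> simp [h]
    · rw [ih x.2 (if x.1 = ci then cs else cs + 1)]
      apply List.map_congr_left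
      intro n _
      simp only [Function.comp, List.take_succ_cons, List.countP_cons, id]
      by_cases h : x.1 = ci <;> simp [h] <;> push_cast <;> ring

/-- B's breaks loop collects exactly the positions of the break pattern. -/
theorem pvBreaks_eq (l : List (Int × Int)) : ∀ (k : Int) (acc : List Int) (prev : Int),
    ((PySem.List.enumerate l k).foldl
      (fun (st : List Int × Int) p =>
        ((if p.2.1 != st.2 then st.1 ++ [p.1] else st.1), p.2.2))
      (acc, prev)).1
    = acc ++ pvTrueIdx k (pvBrk prev l) := by
  induction l with
  | nil => intro k acc prev; simp [pvBrk, pvTrueIdx]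
  | cons x t ih =>
    intro k acc prev
    rw [PySem.List.enumerate_cons, List.foldl_cons]
    beta_reduce
    by_cases h : x.1 = prev
    · rw [if_neg (by simp [h]), ih]
      simp [pvBrk, pvTrueIdx, h]
    · rw [if_pos (by simp [h]), ih]
      simp [pvBrk, pvTrueIdx, h]

theorem pvTrueIdx_ge (bs : List Bool) : ∀ (k : Int) (x : Int), x ∈ pvTrueIdx k bs → k ≤ x := by
  induction bs with
  | nil => intro k x hx; simp [pvTrueIdx] at hx
  | cons b t ih =>
    intro k x hx
    simp only [pvTrueIdx] at hx
    by_cases hb : b = true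
    · simp [hb] at hx
      rcases hx with h | h
      · omega
      · have := ih (k + 1) x h; omega
    · simp [hb] at hx
      have := ih (k + 1) x hx; omega

theorem pvTrueIdx_pairwise (bs : List Bool) : ∀ (k : Int), (pvTrueIdx k bs).Pairwise (· ≤ ·) := by
  induction bs with
  | nil => intro k; simp [pvTrueIdx]
  | cons b t ih =>
    intro k
    simp only [pvTrueIdx]
    by_cases hb : b = true
    · simp only [hb, if_pos rfl]
      exact List.Pairwise.cons (fun x hx => by have := pvTrueIdx_ge t (k + 1) x hx; omega) (ih (k + 1))
    · simp [hb, ih (k + 1)]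

/-- Counting break positions ≤ k + n equals counting breaks in the first n+1 entries. -/
theorem pvTrueIdx_count (bs : List Bool) : ∀ (n : Nat) (k : Int),
    (pvTrueIdx k bs).countP (fun x => decide (x ≤ k + n)) = (bs.take (n + 1)).countP id := by
  induction bs with
  | nil => intro n k; simp [pvTrueIdx]
  | cons b t ih =>
    intro n k
    have hzero : ∀ (c : Int), c < k + 1 → (pvTrueIdx (k + 1) t).countP (fun x => decide (x ≤ c)) = 0 := by
      intro c hc
      apply List.countP_eq_zero.mpr
      intro x hx
      have := pvTrueIdx_ge t (k + 1) x hx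
      simp; omega
    cases n with
    | zero =>
      have h0 : (pvTrueIdx (k + 1) t).countP (fun x => decide (x ≤ k)) = 0 :=
        hzero k (by omega)
      cases b
      · simpa [pvTrueIdx] using h0
      · simp [pvTrueIdx, h0]
    | succ m =>
      have hrec := ih m (k + 1)
      have h1 : (fun x => decide (x ≤ k + ((m + 1 : ℕ) : Int))) = (fun x => decide (x ≤ (k + 1) + (m : ℕ))) := by
        funext x
        have : k + ((m + 1 : ℕ) : Int) = (k + 1) + (m : ℕ) := by push_cast; ring
        rw [this]
      have hk : (k : Int) ≤ (k + 1) + (m : ℕ) := by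
        have : (0 : Int) ≤ (m : ℕ) := Int.natCast_nonneg m
        omega
      cases b
      · simp only [pvTrueIdx, Bool.false_eq_true, if_false]
        rw [h1, hrec]
        simp
      · simp only [pvTrueIdx, if_pos, List.countP_cons]
        rw [h1, hrec]
        simp [hk]
        omega

/-- Correctness of Source B's binary search: it returns the number of elements ≤ i. -/
theorem pvRankLoop_count (xs : List Int) (i : Int) : ∀ (lo hi : Nat),
    lo ≤ hi → hi ≤ xs.length → xs.Pairwise (· ≤ ·) →
    (∀ m (hm : m < xs.length), m < lo → xs[m] ≤ i) →
    (∀ m (hm : m < xs.length), hi ≤ m → ¬ xs[m] ≤ i) →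
    pvRankLoop xs i lo hi = xs.countP (fun x => decide (x ≤ i)) := by
  intro lo hi
  induction lo, hi using pvRankLoop.induct xs i with
  | case1 lo hi h mid hle ih =>
    intro hlohi hhi hsorted hlow hhigh
    rw [pvRankLoop]
    simp only [h, dif_pos]
    rw [if_pos (show xs.getD ((lo + hi) / 2) 0 ≤ i from hle)]
    apply ih (by omega) hhi hsorted
    · intro m hm hmlt
      have hmidlt : mid < hi := Nat.div_lt_of_lt_mul (by omega)
      have hmidlen : mid < xs.length := by omega
      by_cases hcase : m = mid
      · subst hcase; rwa [List.getD_eq_getElem xs 0 hmidlen] at hle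
      · have hmmid : m < mid := by omega
        have := (List.pairwise_iff_getElem.mp hsorted) m mid hm hmidlen hmmid
        rw [List.getD_eq_getElem xs 0 hmidlen] at hle
        omega
    · exact hhigh
  | case2 lo hi h mid hle ih =>
    intro hlohi hhi hsorted hlow hhigh
    rw [pvRankLoop]
    simp only [h, dif_pos]
    rw [if_neg (show ¬ xs.getD ((lo + hi) / 2) 0 ≤ i from hle)]
    have hmidge : lo ≤ mid := Nat.le_div_iff_mul_le (by omega) |>.mpr (by omega)
    apply ih hmidge (by omega) hsorted hlow
    · intro m hm hmid
      have hmidlt : mid < hi := Nat.div_lt_of_lt_mul (by omega)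
      have hmidlen : mid < xs.length := by omega
      rw [List.getD_eq_getElem xs 0 hmidlen] at hle
      by_cases hcase : m = mid
      · subst hcase; omega
      · have := (List.pairwise_iff_getElem.mp hsorted) mid m hmidlen hm (by omega)
        omega
  | case3 lo hi h =>
    intro hlohi hhi hsorted hlow hhigh
    rw [pvRankLoop, dif_neg h]
    have hlo : lo = hi := by omega
    subst hlo
    have hsplit : xs.countP (fun x => decide (x ≤ i))
        = (xs.take lo).countP (fun x => decide (x ≤ i)) + (xs.drop lo).countP (fun x => decide (x ≤ i)) := by
      rw [← List.countP_append, List.take_append_drop]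
    have h1 : (xs.take lo).countP (fun x => decide (x ≤ i)) = lo := by
      rw [List.countP_eq_length.mpr, List.length_take_of_le hhi]
      intro a ha
      obtain ⟨m, hm, ha⟩ := List.mem_iff_getElem.mp ha
      have hm' : m < lo := by
        simp at hm
        omega
      rw [List.getElem_take] at ha
      subst ha
      simp
      exact hlow m (by omega) hm'
    have h2 : (xs.drop lo).countP (fun x => decide (x ≤ i)) = 0 := by
      apply List.countP_eq_zero.mpr
      intro a ha
      obtain ⟨m, hm, ha⟩ := List.mem_iff_getElem.mp ha
      rw [List.getElem_drop] at ha
      subst ha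
      simp
      have := hhigh (lo + m) (by simp at hm; omega) (by omega)
      omega
    omega

-- ===== VERDICT (by name: the statement is the Claim_ definition above) =====
theorem map_disco_to_sent_spec : Claim_equal_map_disco_to_sent := by
  intro l _
  unfold Spec_map_disco_to_sent map_disco_to_sent map_disco_to_sent_alt
  have hA := pvA_run l 0 ((List.range l.length).map (fun _ => (0 : Int))) 0 1 (by simp)
  simp only [Nat.cast_zero] at hA
  rw [hA]
  simp only [List.take_zero, List.nil_append]
  rw [pvRun_eq_count l 1 0]
  have hB : pvBreaks l = pvTrueIdx 0 (pvBrk 1 l) := by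
    unfold pvBreaks
    have := pvBreaks_eq l 0 [] 1
    simpa using this
  rw [hB]
  rw [PySem.List.pyRange_zero_natCast]
  rw [List.map_map]
  apply List.map_congr_left
  intro n hn
  simp only [Function.comp]
  rw [pvRankLoop_count (pvTrueIdx 0 (pvBrk 1 l)) (n : Int) 0 (pvTrueIdx 0 (pvBrk 1 l)).length
    (by omega) (le_refl _) (pvTrueIdx_pairwise _ 0)
    (by intro m hm h; omega) (by intro m hm h; omega)]
  have := pvTrueIdx_count (pvBrk 1 l) n 0
  rw [zero_add] at this
  rw [this]
  simp
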